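-- pv_equiv track=rewrite | github.com/Massprod/leetcode-testing | leetcode_problems/p1640_check_array_formation_through_concatenation.py | can_form_array
-- ===== SOURCE A (Python) =====
-- def can_form_array(arr: list[int], pieces: list[list[int]]) -> bool:
--     # working_sol (61.08%, 94.07%) -> (43ms, 16.38mb)  time: O(n) | space: O(n)
--     # { opener: [whole_sequence] }
--     first_occur: dict[int, list[int]] = {}
--     for piece in pieces:
--         opener: int = piece[0]
--         sequence: list[int] = piece[1:]
--         first_occur[opener] = sequence
--     index: int = 0
--     while index < len(arr):
--         cur_val: int = arr[index]
--         # We can either have full sequence used, and we have only unique integers in `pieces`.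
--         if cur_val in first_occur:
--             index += 1
--             # We can skip values check if we can't use a whole sequence => False
--             if len(arr) - index < len(first_occur[cur_val]):
--                 return False
--             for integer in first_occur[cur_val]:
--                 # Or we can't use some particular value in the sequence => False.
--                 if integer != arr[index]:
--                     return False
--                 index += 1
--         # If we can't even start using some sequence, then we can't use any number in it => False.
--         else:
--             return False
--     return True
-- ===== SOURCE B (Python) =====
-- def can_form_array(arr: list[int], pieces: list[list[int]]) -> bool:
--     # No dict at all: repeatedly strip a matching piece off the front of the
--     # remaining suffix.  For the current first value, scan `pieces` in reverse
--     # for the first piece opening with it (= last such piece, matching dict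
--     # overwrite), and accept it with a single prefix comparison.
--     rest = arr
--     while rest:
--         piece = None
--         for p in reversed(pieces):
--             if p[0] == rest[0]:
--                 piece = p
--                 break
--         if piece is None or rest[:len(piece)] != piece:
--             return False
--         rest = rest[len(piece):]
--     return True
-- ===== Notes on version B (the rewrite author's own statement) =====
-- stated objective: alternative
-- what changed: B drops the dict entirely: it repeatedly strips a piece off the front of the remaining suffix of arr, finding the piece by scanning pieces in reverse for the first one opening with the current value (= A's dict-overwrite winner) and accepting it with a single prefix comparison, replacing A's precomputed opener map, index arithmetic, remaining-length check and element-by-element inner loop.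
import Mathlib
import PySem

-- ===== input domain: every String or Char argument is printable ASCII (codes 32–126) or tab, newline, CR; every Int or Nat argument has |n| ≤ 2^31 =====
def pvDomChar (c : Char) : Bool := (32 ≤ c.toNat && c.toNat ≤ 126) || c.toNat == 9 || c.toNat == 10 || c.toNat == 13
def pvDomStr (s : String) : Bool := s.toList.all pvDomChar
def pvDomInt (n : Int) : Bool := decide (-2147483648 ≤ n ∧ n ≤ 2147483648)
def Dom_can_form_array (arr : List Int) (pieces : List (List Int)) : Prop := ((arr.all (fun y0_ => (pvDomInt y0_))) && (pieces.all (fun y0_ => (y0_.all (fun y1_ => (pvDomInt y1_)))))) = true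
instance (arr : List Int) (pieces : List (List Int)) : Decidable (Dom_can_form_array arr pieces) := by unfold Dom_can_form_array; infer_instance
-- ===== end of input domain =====

-- B removes A's opener dict: it strips matching pieces off the front of the remaining suffix,
-- finding each piece by a reverse scan of `pieces` and one prefix comparison (objective: alternative).


-- ===== PORT A =====
-- A's inner `for integer in first_occur[cur_val]` loop: compares seq against arr from index i,
-- returns the final index (some) or none at the first mismatch (A's `return False`).
-- (arr[i]? = none is unreachable: A checks the remaining length first.)
def pvAInner (arr : List Int) : Nat → List Int → Option Nat
  | i, [] => some i
  | i, x :: rest =>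
    match arr[i]? with
    | none => none
    | some v => if x ≠ v then none else pvAInner arr (i + 1) rest

-- A's `while index < len(arr)` loop; fuel only makes the recursion total (arr.length + 1 is always enough).
def pvALoop (arr : List Int) (d : PySem.Dict Int (List Int)) : Nat → Nat → Bool
  | 0, _ => false
  | fuel + 1, i =>
    if h : i < arr.length then
      match d.get? arr[i] with
      | none => false
      | some seq =>
        if arr.length - (i + 1) < seq.length then false
        else
          match pvAInner arr (i + 1) seq with
          | none => false
          | some j => pvALoop arr d fuel j
    else true

def can_form_array (arr : List Int) (pieces : List (List Int)) : Bool :=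
  -- { opener: piece[1:] }; `piece[0]` raises IndexError on an empty piece — excluded by Pre_
  let d : PySem.Dict Int (List Int) :=
    pieces.foldl (fun d piece =>
      match piece with
      | [] => d
      | x :: rest => d.insert x rest) PySem.Dict.empty
  pvALoop arr d (arr.length + 1) 0

-- ===== PORT B =====
-- B's `for p in reversed(pieces)` scan: first piece (of the reversed list) whose head is x.
-- `p[0]` raises IndexError on an empty piece (none here) — excluded by Pre_.
def pvFind : List (List Int) → Int → Option (List Int)
  | [], _ => none
  | p :: rest, x =>
    match p with
    | [] => none
    | y :: _ => if y = x then some p else pvFind rest x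

-- B's `while rest` loop; fuel only makes the recursion total (arr.length + 1 is always enough).
-- `rest[:len(piece)]` / `rest[len(piece):]` are slices with nonnegative bounds = take / drop (exact).
def pvBLoop (pieces : List (List Int)) : Nat → List Int → Bool
  | _, [] => true
  | 0, _ :: _ => false
  | fuel + 1, x :: rs =>
    match pvFind pieces.reverse x with
    | none => false
    | some p => if (x :: rs).take p.length = p then pvBLoop pieces fuel ((x :: rs).drop p.length) else false

def can_form_array_alt (arr : List Int) (pieces : List (List Int)) : Bool :=
  pvBLoop pieces (arr.length + 1) arr

-- ===== PRECONDITION & SPEC =====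
-- Pre_ excludes inputs containing an empty piece: there `piece[0]` raises IndexError in A (always,
-- at dict-build time) and B has no defined value either (it may raise in its scan).
def Pre_can_form_array (arr : List Int) (pieces : List (List Int)) : Prop :=
  ∀ p ∈ pieces, p ≠ []
instance (arr : List Int) (pieces : List (List Int)) : Decidable (Pre_can_form_array arr pieces) := by unfold Pre_can_form_array; infer_instance

def pvWitness_can_form_array : List Int × List (List Int) := ([1, 2, 3], [[1, 2], [3]])

def Spec_can_form_array (arr : List Int) (pieces : List (List Int)) (out : Bool) : Prop := out = can_form_array_alt arr pieces
instance (arr : List Int) (pieces : List (List Int)) (out : Bool) : Decidable (Spec_can_form_array arr pieces out) := by unfold Spec_can_form_array; infer_instance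

-- ===== CLAIM (what is proved, stated in full; the proofs are below) =====
def Claim_equal_can_form_array : Prop := ∀ (arr : List Int) (pieces : List (List Int)), Dom_can_form_array arr pieces → Pre_can_form_array arr pieces → Spec_can_form_array arr pieces (can_form_array arr pieces)

-- ===== LEMMAS AND PROOFS =====

-- pvFind yields a piece opening with the searched value.
theorem pvFind_head {l : List (List Int)} {x : Int} {p : List Int}
    (h : pvFind l x = some p) : ∃ t, p = x :: t := by
  induction l with
  | nil => simp [pvFind] at h
  | cons q rest ih =>
    cases q with
    | nil => simp [pvFind] at h
    | cons y t =>
      rw [pvFind] at h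
      by_cases hy : y = x
      · rw [if_pos hy] at h
        exact ⟨t, by rw [← Option.some_inj.mp h, hy]⟩
      · rw [if_neg hy] at h
        exact ih h

-- pvFind over an append, when every piece of the first part is nonempty (so none = not found).
theorem pvFind_append (l1 l2 : List (List Int)) (x : Int) (hne : ∀ p ∈ l1, p ≠ []) :
    pvFind (l1 ++ l2) x =
      match pvFind l1 x with
      | some p => some p
      | none => pvFind l2 x := by
  induction l1 with
  | nil => simp [pvFind]
  | cons q rest ih =>
    cases q with
    | nil => exact absurd rfl (hne [] (by simp))
    | cons y t =>
      rw [List.cons_append, pvFind, pvFind]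
      by_cases hy : y = x
      · simp [hy]
      · rw [if_neg hy, if_neg hy, ih (fun p hp => hne p (by simp [hp]))]

-- A's dict lookup = tail of what B's reverse scan finds.
theorem pvDict_eq (pieces : List (List Int)) (hne : ∀ p ∈ pieces, p ≠ []) :
    ∀ (da : PySem.Dict Int (List Int)) (k : Int),
      (pieces.foldl (fun d piece =>
        match piece with
        | [] => d
        | x :: rest => d.insert x rest) da).get? k =
      match pvFind pieces.reverse k with
      | some p => some p.tail
      | none => da.get? k := by
  induction pieces with
  | nil => intro da k; simp [pvFind]
  | cons q rest ih =>
    intro da k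
    cases q with
    | nil => exact absurd rfl (hne [] (by simp))
    | cons y t =>
      have hne' : ∀ p ∈ rest, p ≠ [] := fun p hp => hne p (by simp [hp])
      rw [List.foldl_cons, List.reverse_cons,
        pvFind_append rest.reverse [y :: t] k (fun p hp => hne' p (List.mem_reverse.mp hp)),
        ih hne' (da.insert y t) k]
      rcases hf : pvFind rest.reverse k with _ | p
      · simp only
        rw [PySem.Dict.get?_insert, pvFind]
        by_cases hy : y = k
        · simp [hy]
        · simp [hy, Ne.symm hy, pvFind]
      · simp

-- A's inner loop characterised: on an in-range segment it succeeds iff seq is exactly that slice.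
theorem pvAInner_eq (arr : List Int) (seq : List Int) (i : Nat)
    (hle : i + seq.length ≤ arr.length) :
    pvAInner arr i seq =
      (if seq = (arr.drop i).take seq.length then some (i + seq.length) else none) := by
  induction seq generalizing i with
  | nil => simp [pvAInner]
  | cons x rest ih =>
    have hi : i < arr.length := by simp at hle; omega
    have hdrop : arr.drop i = arr[i] :: arr.drop (i + 1) := List.drop_eq_getElem_cons hi
    have hred : pvAInner arr i (x :: rest) =
        if x ≠ arr[i] then none else pvAInner arr (i + 1) rest := by
      rw [pvAInner, List.getElem?_eq_getElem hi]
    have hcond : ((x :: rest) = (arr.drop i).take (x :: rest).length) ↔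
        (x = arr[i] ∧ rest = (arr.drop (i + 1)).take rest.length) := by
      rw [show (x :: rest).length = rest.length + 1 from rfl, hdrop, List.take_succ_cons,
        List.cons.injEq]
    rw [hred]
    by_cases hx : x = arr[i]
    · have hle' : (i + 1) + rest.length ≤ arr.length := by simp at hle; omega
      rw [if_neg (by simp [hx]), ih (i + 1) hle']
      by_cases hr : rest = (arr.drop (i + 1)).take rest.length
      · rw [if_pos hr, if_pos (hcond.mpr ⟨hx, hr⟩)]
        simp only [List.length_cons, Option.some.injEq]; omega
      · rw [if_neg hr, if_neg (fun hc => hr (hcond.mp hc).2)]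
    · rw [if_pos hx, if_neg (fun hc => hx (hcond.mp hc).1)]

-- Main synchronisation: A's indexed loop over its dict = B's suffix-stripping loop.
theorem pvLoop_sync (arr : List Int) (pieces : List (List Int)) (hne : ∀ p ∈ pieces, p ≠ []) :
    ∀ fuel i, arr.length - i < fuel → i ≤ arr.length →
      pvALoop arr (pieces.foldl (fun d piece =>
        match piece with
        | [] => d
        | x :: rest => d.insert x rest) PySem.Dict.empty) fuel i =
      pvBLoop pieces fuel (arr.drop i) := by
  intro fuel
  induction fuel with
  | zero => intro i h; omega
  | succ fuel ih =>
    intro i hfuel hile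
    by_cases hi : i < arr.length
    · have hdrop : arr.drop i = arr[i] :: arr.drop (i + 1) := List.drop_eq_getElem_cons hi
      rw [pvALoop, dif_pos hi, hdrop, pvBLoop, pvDict_eq pieces hne PySem.Dict.empty arr[i]]
      rcases hf : pvFind pieces.reverse arr[i] with _ | p
      · simp
      · obtain ⟨t, rfl⟩ := pvFind_head hf
        simp only [List.tail_cons, List.length_cons, List.take_succ_cons, List.cons.injEq,
          true_and]
        have hrs : (arr.drop (i + 1)).length = arr.length - (i + 1) := by
          simp [List.length_drop]
        by_cases hlen : arr.length - (i + 1) < t.length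
        · rw [if_pos hlen, if_neg]
          intro hc
          have := congrArg List.length hc
          simp [List.length_take, hrs] at this
          omega
        · rw [if_neg hlen, pvAInner_eq arr t (i + 1) (by omega)]
          by_cases hm : t = (arr.drop (i + 1)).take t.length
          · rw [if_pos hm, if_pos hm.symm]
            have hj : (arr[i] :: arr.drop (i + 1)).drop (t.length + 1) =
                arr.drop (i + 1 + t.length) := by
              rw [List.drop_succ_cons, List.drop_drop]
            rw [hj]
            exact ih (i + 1 + t.length) (by omega) (by omega)
          · rw [if_neg hm, if_neg (fun hc => hm hc.symm)]
    · rw [pvALoop, dif_neg hi, List.drop_of_length_le (by omega), pvBLoop]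

-- ===== VERDICT (by name: the statement is the Claim_ definition above) =====
theorem can_form_array_spec : Claim_equal_can_form_array := by
  intro arr pieces _ hpre
  unfold Spec_can_form_array can_form_array can_form_array_alt
  have hs := pvLoop_sync arr pieces hpre (arr.length + 1) 0 (by omega) (by omega)
  simpa using hs
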